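-- pv_equiv track=rewrite | github.com/ovalli/Geodashboard | src/ui/app_core_parametrage_parois.py | _normalize_parois_rows
-- ===== SOURCE A (Python) =====
-- from typing import Any
--
-- def _as_str(v: Any) -> str:
--     if v is None:
--         return ""
--     s = str(v).strip()
--     if s.lower() == "nan":
--         return ""
--     return s
--
-- def _default_paroi_row(coupe_name: str) -> dict:
--     return {
--         "coupe": coupe_name,
--         "cote_arase_sup": "",
--         "cote_arase_inf": "",
--         "cote_fond_fouille_def": "",
--         "largeur_m_opt": "",
--     }
--
-- def _normalize_parois_rows(rows_in: Any, coupe_names: list[str]) -> list[dict]: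
--     # On veut 1 ligne par coupe (dans l'ordre coupe_names)
--     out_by_name: dict[str, dict] = {n: _default_paroi_row(n) for n in coupe_names if n}
--
--     if isinstance(rows_in, list):
--         for it in rows_in:
--             if not isinstance(it, dict):
--                 continue
--             name = str(it.get("coupe", "") or "").strip()
--             if not name or name not in out_by_name:
--                 continue
--             out_by_name[name] = {
--                 "coupe": name,
--                 "cote_arase_sup": _as_str(it.get("cote_arase_sup", "")),
--                 "cote_arase_inf": _as_str(it.get("cote_arase_inf", "")),
--                 "cote_fond_fouille_def": _as_str(it.get("cote_fond_fouille_def", "")),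
--                 "largeur_m_opt": _as_str(it.get("largeur_m_opt", "")),
--             }
--
--     return [out_by_name[n] for n in coupe_names if n]
-- ===== SOURCE B (Python) =====
-- from typing import Any
--
-- def _as_str(v: Any) -> str:
--     if v is None:
--         return ""
--     s = str(v).strip()
--     if s.lower() == "nan":
--         return ""
--     return s
--
-- def _default_paroi_row(coupe_name: str) -> dict:
--     return {
--         "coupe": coupe_name,
--         "cote_arase_sup": "",
--         "cote_arase_inf": "",
--         "cote_fond_fouille_def": "",
--         "largeur_m_opt": "",
--     }
--
-- def _normalize_parois_rows(rows_in: Any, coupe_names: list[str]) -> list[dict]: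
--     # No dict: for each truthy coupe name, reverse-scan the rows for the LAST
--     # row whose normalized name matches (A's last-wins overwrite), else default.
--     rows = [it for it in rows_in if isinstance(it, dict)] if isinstance(rows_in, list) else []
--     out: list[dict] = []
--     for n in coupe_names:
--         if not n:
--             continue
--         for it in reversed(rows):
--             if str(it.get("coupe", "") or "").strip() == n:
--                 out.append({
--                     "coupe": n,
--                     "cote_arase_sup": _as_str(it.get("cote_arase_sup", "")),
--                     "cote_arase_inf": _as_str(it.get("cote_arase_inf", "")),
--                     "cote_fond_fouille_def": _as_str(it.get("cote_fond_fouille_def", "")),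
--                     "largeur_m_opt": _as_str(it.get("largeur_m_opt", "")),
--                 })
--                 break
--         else:
--             out.append(_default_paroi_row(n))
--     return out
-- ===== Notes on version B (the rewrite author's own statement) =====
-- stated objective: alternative
-- what changed: B drops the dictionary entirely: instead of seeding a dict of defaults keyed by coupe name and destructively overwriting it while scanning rows, B does a reverse linear search through the rows for each truthy coupe name (last match wins) and builds the normalized or default row on the spot; it trades A's O(r+c) hashing for an O(c*r) dict-free scan.
import Mathlib
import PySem

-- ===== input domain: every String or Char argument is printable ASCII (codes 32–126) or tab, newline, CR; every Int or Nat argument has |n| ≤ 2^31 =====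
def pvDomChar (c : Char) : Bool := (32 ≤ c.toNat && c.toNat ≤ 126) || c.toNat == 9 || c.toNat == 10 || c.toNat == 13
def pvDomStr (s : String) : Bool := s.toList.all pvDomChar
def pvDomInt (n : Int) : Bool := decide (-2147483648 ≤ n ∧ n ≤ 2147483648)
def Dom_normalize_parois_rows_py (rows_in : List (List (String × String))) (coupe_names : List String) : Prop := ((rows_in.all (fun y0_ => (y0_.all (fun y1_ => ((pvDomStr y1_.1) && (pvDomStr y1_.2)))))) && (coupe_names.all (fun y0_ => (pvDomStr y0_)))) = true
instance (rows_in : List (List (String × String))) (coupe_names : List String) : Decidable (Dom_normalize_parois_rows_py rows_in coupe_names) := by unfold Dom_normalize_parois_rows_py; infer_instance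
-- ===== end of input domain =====

-- B drops A's seeded-then-mutated dict: per truthy coupe name it reverse-scans the rows for
-- the last matching one (else a default) — a dict-free alternative of similar size.

-- shared helpers (the Python module's _as_str / _default_paroi_row and the row literal both
-- functions build; exact on strings: `str(v)` is the identity and `v is None` is impossible here)
def pvAsStr (v : String) : String :=
  let s := PySem.Str.strip v
  if PySem.Str.lower s = "nan" then "" else s

def pvDefaultRow (n : String) : List (String × String) :=
  [("coupe", n), ("cote_arase_sup", ""), ("cote_arase_inf", ""),
   ("cote_fond_fouille_def", ""), ("largeur_m_opt", "")]

-- str(it.get("coupe","") or "").strip(): `or ""` and str() are the identity on strings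
def pvRowName (it : List (String × String)) : String :=
  PySem.Str.strip ((PySem.Dict.ofList it).getD "coupe" "")

def pvNormRow (name : String) (it : List (String × String)) : List (String × String) :=
  let d := PySem.Dict.ofList it
  [("coupe", name),
   ("cote_arase_sup", pvAsStr (d.getD "cote_arase_sup" "")),
   ("cote_arase_inf", pvAsStr (d.getD "cote_arase_inf" "")),
   ("cote_fond_fouille_def", pvAsStr (d.getD "cote_fond_fouille_def" "")),
   ("largeur_m_opt", pvAsStr (d.getD "largeur_m_opt" ""))]

-- ===== PORT A =====
def normalize_parois_rows_py (rows_in : List (List (String × String))) (coupe_names : List String) : List (List (String × String)) :=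
  -- out_by_name = {n: _default_paroi_row(n) for n in coupe_names if n}
  let out0 : PySem.Dict String (List (String × String)) :=
    coupe_names.foldl (fun d n => if n = "" then d else d.insert n (pvDefaultRow n)) PySem.Dict.empty
  -- for it in rows_in: …  (every `it` is a dict in this type)
  let outF : PySem.Dict String (List (String × String)) :=
    rows_in.foldl (fun d it =>
      let name := pvRowName it
      if name = "" ∨ d.contains name = false then d
      else d.insert name (pvNormRow name it)) out0
  -- return [out_by_name[n] for n in coupe_names if n]
  (coupe_names.filter (fun n => n ≠ "")).map (fun n => outF.getD n [])

-- ===== PORT B =====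
def normalize_parois_rows_py_alt (rows_in : List (List (String × String))) (coupe_names : List String) : List (List (String × String)) :=
  -- for n in coupe_names: if not n: continue; reverse-scan rows for the last match, else default
  coupe_names.foldl (fun out n =>
    if n = "" then out
    else
      match rows_in.reverse.find? (fun it => pvRowName it == n) with
      | some it => out ++ [pvNormRow n it]
      | none => out ++ [pvDefaultRow n]) []

-- ===== PRECONDITION & SPEC =====
def Spec_normalize_parois_rows_py (rows_in : List (List (String × String))) (coupe_names : List String) (out : List (List (String × String))) : Prop := out = normalize_parois_rows_py_alt rows_in coupe_names
instance (rows_in : List (List (String × String))) (coupe_names : List String) (out : List (List (String × String))) : Decidable (Spec_normalize_parois_rows_py rows_in coupe_names out) := by unfold Spec_normalize_parois_rows_py; infer_instance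

-- ===== CLAIM =====
def Claim_equal_normalize_parois_rows_py : Prop := ∀ (rows_in : List (List (String × String))) (coupe_names : List String), Dom_normalize_parois_rows_py rows_in coupe_names → Spec_normalize_parois_rows_py rows_in coupe_names (normalize_parois_rows_py rows_in coupe_names)

-- ===== LEMMAS AND PROOFS =====

-- B's loop as filter+map of the per-name pick
def pvPick (rows_in : List (List (String × String))) (n : String) : List (String × String) :=
  match rows_in.reverse.find? (fun it => pvRowName it == n) with
  | some it => pvNormRow n it
  | none => pvDefaultRow n

theorem pv_alt_eq (rows_in : List (List (String × String))) (coupe_names : List String)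
    (acc : List (List (String × String))) :
    coupe_names.foldl (fun out n =>
      if n = "" then out
      else
        match rows_in.reverse.find? (fun it => pvRowName it == n) with
        | some it => out ++ [pvNormRow n it]
        | none => out ++ [pvDefaultRow n]) acc
    = acc ++ (coupe_names.filter (fun n => n ≠ "")).map (pvPick rows_in) := by
  induction coupe_names generalizing acc with
  | nil => simp
  | cons m rest ih =>
    simp only [List.foldl, List.filter]
    by_cases hm : m = ""
    · simp [hm, ih]
    · have hd : (decide ¬m = "") = true := by simpa using hm
      rw [if_neg hm, hd]
      have hstep : (match rows_in.reverse.find? (fun it => pvRowName it == m) with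
          | some it => acc ++ [pvNormRow m it]
          | none => acc ++ [pvDefaultRow m]) = acc ++ [pvPick rows_in m] := by
        unfold pvPick
        cases h : rows_in.reverse.find? (fun it => pvRowName it == m) <;> simp [h]
      rw [hstep, ih]
      simp

-- the seed dict maps every key it contains to its default row
theorem pv_seed_get? (names : List String) (d : PySem.Dict String (List (String × String)))
    (h : ∀ n, d.get? n = if d.contains n then some (pvDefaultRow n) else none) :
    ∀ n, (names.foldl (fun d n => if n = "" then d else d.insert n (pvDefaultRow n)) d).get? n =
      if (names.foldl (fun d n => if n = "" then d else d.insert n (pvDefaultRow n)) d).contains n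
      then some (pvDefaultRow n) else none := by
  induction names generalizing d with
  | nil => simpa using h
  | cons m rest ih =>
    simp only [List.foldl]
    by_cases hm : m = ""
    · simp only [hm]; exact ih d h
    · simp only [if_neg hm]
      refine ih _ (fun n => ?_)
      rw [PySem.Dict.get?_insert, PySem.Dict.contains_insert]
      by_cases hn : n = m
      · simp [hn]
      · simp only [if_neg hn, h n]
        have : (n == m) = false := by simpa using hn
        simp [this]

-- membership of a truthy name in the seed dict
theorem pv_seed_contains (names : List String) (d : PySem.Dict String (List (String × String)))
    (n : String) (hn : n ∈ names) (hne : n ≠ "") :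
    (names.foldl (fun d n => if n = "" then d else d.insert n (pvDefaultRow n)) d).contains n = true := by
  induction names generalizing d with
  | nil => cases hn
  | cons m rest ih =>
    simp only [List.foldl]
    rcases List.mem_cons.mp hn with h | h
    · subst h
      rw [if_neg hne]
      have mono : ∀ (l : List String) (d : PySem.Dict String (List (String × String))),
          d.contains n = true →
          (l.foldl (fun d n => if n = "" then d else d.insert n (pvDefaultRow n)) d).contains n = true := by
        intro l
        induction l with
        | nil => intro d hd; simpa using hd
        | cons x xs ihx =>
          intro d hd
          simp only [List.foldl]
          apply ihx
          by_cases hx : x = ""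
          · simpa [hx] using hd
          · rw [if_neg hx, PySem.Dict.contains_insert, hd, Bool.or_true]
      exact mono rest _ (by simp [PySem.Dict.contains_insert_self])
    · exact ih _ h

-- core: for a key n present in d, A's row loop produces the last matching row's normalized
-- value (found by B's reverse search), or leaves d's value
theorem pv_A_fold_get (rows : List (List (String × String)))
    (d : PySem.Dict String (List (String × String))) (n : String)
    (hne : n ≠ "") (hc : d.contains n = true) :
    (rows.foldl (fun d it =>
      let name := pvRowName it
      if name = "" ∨ d.contains name = false then d
      else d.insert name (pvNormRow name it)) d).get? n =
    match rows.reverse.find? (fun it => pvRowName it == n) with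
    | some it => some (pvNormRow n it)
    | none => d.get? n := by
  induction rows generalizing d with
  | nil => simp
  | cons it rest ih =>
    simp only [List.foldl, List.reverse_cons, List.find?_append]
    have hcontains : ∀ d', (if pvRowName it = "" ∨ d.contains (pvRowName it) = false then d
        else d.insert (pvRowName it) (pvNormRow (pvRowName it) it)) = d' → d'.contains n = true := by
      intro d' hd'
      subst hd'
      split_ifs with h
      · exact hc
      · rw [PySem.Dict.contains_insert, hc, Bool.or_true]
    have step_contains : (if pvRowName it = "" ∨ d.contains (pvRowName it) = false then d
        else d.insert (pvRowName it) (pvNormRow (pvRowName it) it)).contains n = true :=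
      hcontains _ rfl
    rw [ih _ step_contains]
    cases hf : rest.reverse.find? (fun it => pvRowName it == n) with
    | some it' => simp
    | none =>
      simp only [Option.none_or]
      by_cases hmatch : pvRowName it = n
      · have hb : (pvRowName it == n) = true := by simpa using hmatch
        have hfind : [it].find? (fun it => pvRowName it == n) = some it := by
          simp [hb]
        rw [hfind]
        have hnc : d.contains (pvRowName it) = true := by rw [hmatch]; exact hc
        rw [if_neg (by simp [hmatch ▸ hne, hnc])]
        rw [PySem.Dict.get?_insert, if_pos hmatch.symm, hmatch]
      · have hb : (pvRowName it == n) = false := by simpa using hmatch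
        have hfind : [it].find? (fun it => pvRowName it == n) = none := by
          simp [hb]
        rw [hfind]
        split_ifs with h
        · rfl
        · rw [PySem.Dict.get?_insert, if_neg (fun he => hmatch he.symm)]

-- ===== VERDICT =====
theorem normalize_parois_rows_py_spec : Claim_equal_normalize_parois_rows_py := by
  intro rows_in coupe_names _
  unfold Spec_normalize_parois_rows_py normalize_parois_rows_py normalize_parois_rows_py_alt
  rw [pv_alt_eq rows_in coupe_names [], List.nil_append]
  apply List.map_congr_left
  intro n hn
  have hmem := List.mem_filter.mp hn
  have hne : n ≠ "" := by simpa using hmem.2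
  have hseed := pv_seed_get? coupe_names PySem.Dict.empty
    (fun m => by simp [PySem.Dict.get?_empty, PySem.Dict.contains_empty])
  have hcont := pv_seed_contains coupe_names PySem.Dict.empty n hmem.1 hne
  have hfold := pv_A_fold_get rows_in
    (coupe_names.foldl (fun d n => if n = "" then d else d.insert n (pvDefaultRow n)) PySem.Dict.empty)
    n hne hcont
  rw [PySem.Dict.getD_eq_get?_getD, hfold]
  unfold pvPick
  cases hf : rows_in.reverse.find? (fun it => pvRowName it == n) with
  | some it => simp
  | none =>
    rw [hseed n, if_pos hcont]
    simp
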